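-- pv_equiv track=rewrite | github.com/parv112281/CSCI-E-33A | Final_Project/finalproject/epitope_extraction_tool/clustal_omega.py | remap_epitopes
-- ===== SOURCE A (Python) =====
-- def remap_epitopes(epitopes, aligned_sequences):
--     new_epitopes = []
--     for i in range(len(aligned_sequences)):
--         curr_new_epitopes = []
--         epitopes_ptr = 0
--         residue_pos = 1
--         curr_sequence = aligned_sequences[i]
--         curr_epitopes = epitopes[i]
--
--         for j in range(len(curr_sequence)):
--             if len(curr_epitopes) <= 0:
--                 break
--             if curr_sequence[j] == "-":
--                 continue
--             if residue_pos == curr_epitopes[epitopes_ptr]: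
--                 curr_new_epitopes.append(j+1)
--                 epitopes_ptr += 1
--                 if (epitopes_ptr >= len(curr_epitopes)):
--                     break
--             residue_pos += 1
--         new_epitopes.append(curr_new_epitopes)
--     return new_epitopes
-- ===== SOURCE B (Python) =====
-- def remap_epitopes(epitopes, aligned_sequences):
--     new_epitopes = []
--     for curr_sequence, curr_epitopes in zip(aligned_sequences, epitopes):
--         # pass 1: aligned 1-based column of each residue (gaps skipped)
--         positions = [j + 1 for j, c in enumerate(curr_sequence) if c != "-"]
--         # pass 2: forward-only pointer match of epitope residue numbers
--         curr_new = []
--         ptr = 0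
--         if curr_epitopes:
--             for r, p in enumerate(positions, start=1):
--                 if r == curr_epitopes[ptr]:
--                     curr_new.append(p)
--                     ptr += 1
--                     if ptr >= len(curr_epitopes):
--                         break
--         new_epitopes.append(curr_new)
--     return new_epitopes
-- ===== Notes on version B (the rewrite author's own statement) =====
-- stated objective: alternative
-- what changed: B separates A's single interleaved gap-counting/epitope-matching scan into two passes: one pass builds the residue-to-aligned-column table, a second pass runs the forward-only pointer match over that table, pairing sequences with epitopes by zip instead of index.
import Mathlib
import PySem

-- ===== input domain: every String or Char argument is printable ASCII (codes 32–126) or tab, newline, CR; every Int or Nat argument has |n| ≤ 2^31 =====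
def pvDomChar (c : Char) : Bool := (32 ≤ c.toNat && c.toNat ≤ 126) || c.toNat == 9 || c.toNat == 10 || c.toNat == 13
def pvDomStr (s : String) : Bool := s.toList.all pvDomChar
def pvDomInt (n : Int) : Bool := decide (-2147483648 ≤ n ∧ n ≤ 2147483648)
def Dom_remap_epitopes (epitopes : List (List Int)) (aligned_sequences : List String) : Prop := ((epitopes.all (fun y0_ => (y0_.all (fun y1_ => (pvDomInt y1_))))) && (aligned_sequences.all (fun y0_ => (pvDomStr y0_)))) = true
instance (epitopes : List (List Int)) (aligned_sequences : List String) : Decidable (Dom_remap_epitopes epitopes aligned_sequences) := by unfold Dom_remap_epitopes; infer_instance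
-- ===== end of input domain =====

-- B splits A's interleaved scan into two passes (residue→column table, then pointer match); same cost, different decomposition.

-- ===== PORT A =====
-- inner 'for j in range(len(curr_sequence))' loop of A, recursing over the characters,
-- carrying j (0-based column), ptr, residue_pos and the accumulator; early 'break's return acc.
def aInner (cs : List Char) (eps : List Int) (j : Int) (ptr : Nat) (rpos : Int)
    (acc : List Int) : List Int :=
  match cs with
  | [] => acc
  | c :: rest =>
    if eps.length ≤ 0 then acc
    else if c = '-' then aInner rest eps (j + 1) ptr rpos acc
    else if rpos = eps.getD ptr 0 then
      let acc' := acc ++ [j + 1]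
      if eps.length ≤ ptr + 1 then acc'
      else aInner rest eps (j + 1) (ptr + 1) (rpos + 1) acc'
    else aInner rest eps (j + 1) ptr (rpos + 1) acc

-- outer 'for i in range(len(aligned_sequences))' loop of A: index recursion, epitopes[i] via pyGet?
def aOuter (epitopes : List (List Int)) (seqs : List String) (i : Nat)
    (acc : List (List Int)) : List (List Int) :=
  if h : i < seqs.length then
    let curr_sequence := seqs[i]
    let curr_epitopes := (PySem.List.pyGet? epitopes (i : Int)).getD []
    aOuter epitopes seqs (i + 1) (acc ++ [aInner curr_sequence.toList curr_epitopes 0 0 1 []])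
  else acc
termination_by seqs.length - i

def remap_epitopes (epitopes : List (List Int)) (aligned_sequences : List String) : List (List Int) :=
  aOuter epitopes aligned_sequences 0 []

-- ===== PORT B =====
-- pass 1: '[j + 1 for j, c in enumerate(curr_sequence) if c != "-"]', carrying the 0-based index j
def bPositions (cs : List Char) (j : Int) : List Int :=
  match cs with
  | [] => []
  | c :: rest => if c = '-' then bPositions rest (j + 1) else (j + 1) :: bPositions rest (j + 1)

-- pass 2: 'for r, p in enumerate(positions, start=1)' with the forward-only pointer
def bMatch (positions : List Int) (eps : List Int) (ptr : Nat) (r : Int)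
    (acc : List Int) : List Int :=
  match positions with
  | [] => acc
  | p :: rest =>
    if r = eps.getD ptr 0 then
      let acc' := acc ++ [p]
      if eps.length ≤ ptr + 1 then acc'
      else bMatch rest eps (ptr + 1) (r + 1) acc'
    else bMatch rest eps ptr (r + 1) acc

def remap_epitopes_alt (epitopes : List (List Int)) (aligned_sequences : List String) : List (List Int) :=
  (aligned_sequences.zip epitopes).map (fun se =>
    let positions := bPositions se.1.toList 0
    if se.2.isEmpty then [] else bMatch positions se.2 0 1 [])

-- ===== PRECONDITION & SPEC =====
-- Pre_ excludes exactly the inputs where A raises IndexError at epitopes[i]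
def Pre_remap_epitopes (epitopes : List (List Int)) (aligned_sequences : List String) : Prop :=
  aligned_sequences.length ≤ epitopes.length
instance (epitopes : List (List Int)) (aligned_sequences : List String) : Decidable (Pre_remap_epitopes epitopes aligned_sequences) := by unfold Pre_remap_epitopes; infer_instance
def pvWitness_remap_epitopes : List (List Int) × List String := ([[1, 3]], ["A-BC"])

def Spec_remap_epitopes (epitopes : List (List Int)) (aligned_sequences : List String) (out : List (List Int)) : Prop := out = remap_epitopes_alt epitopes aligned_sequences
instance (epitopes : List (List Int)) (aligned_sequences : List String) (out : List (List Int)) : Decidable (Spec_remap_epitopes epitopes aligned_sequences out) := by unfold Spec_remap_epitopes; infer_instance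

-- ===== CLAIM (what is proved, stated in full; the proofs are below) =====
def Claim_equal_remap_epitopes : Prop := ∀ (epitopes : List (List Int)) (aligned_sequences : List String), Dom_remap_epitopes epitopes aligned_sequences → Pre_remap_epitopes epitopes aligned_sequences → Spec_remap_epitopes epitopes aligned_sequences (remap_epitopes epitopes aligned_sequences)

-- ===== LEMMAS AND PROOFS =====

-- A's inner loop equals B's two passes, for a live pointer
lemma inner_eq (cs : List Char) : ∀ (eps : List Int) (j : Int) (ptr : Nat) (rpos : Int)
    (acc : List Int), ptr < eps.length →
    aInner cs eps j ptr rpos acc = bMatch (bPositions cs j) eps ptr rpos acc := by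
  induction cs with
  | nil => intro eps j ptr rpos acc h; simp [aInner, bPositions, bMatch]
  | cons c rest ih =>
    intro eps j ptr rpos acc h
    simp only [aInner, bPositions]
    have hne : ¬ eps.length ≤ 0 := by omega
    rw [if_neg hne]
    by_cases hc : c = '-'
    · rw [if_pos hc, if_pos hc, ih _ _ _ _ _ h]
    · rw [if_neg hc, if_neg hc]
      simp only [bMatch]
      by_cases hm : rpos = eps.getD ptr 0
      · rw [if_pos hm, if_pos hm]
        by_cases hb : eps.length ≤ ptr + 1
        · rw [if_pos hb, if_pos hb]
        · rw [if_neg hb, if_neg hb, ih _ _ _ _ _ (by omega)]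
      · rw [if_neg hm, if_neg hm, ih _ _ _ _ _ h]

-- A's inner loop with an empty epitope list returns the accumulator
lemma inner_nil (cs : List Char) (j : Int) (ptr : Nat) (rpos : Int) (acc : List Int) :
    aInner cs [] j ptr rpos acc = acc := by
  cases cs <;> simp [aInner]

-- the per-sequence results agree
lemma per_seq (s : String) (e : List Int) :
    aInner s.toList e 0 0 1 [] =
      (if e.isEmpty then [] else bMatch (bPositions s.toList 0) e 0 1 []) := by
  cases e with
  | nil => simp [inner_nil]
  | cons x xs => rw [if_neg (by simp)]; exact inner_eq _ _ _ _ _ _ (by simp)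

-- A's outer index loop equals B's map over the zip of the remaining suffixes
lemma outer_eq (epitopes : List (List Int)) (seqs : List String)
    (hlen : seqs.length ≤ epitopes.length) :
    ∀ (n i : Nat) (acc : List (List Int)), seqs.length - i = n →
    aOuter epitopes seqs i acc =
      acc ++ ((seqs.drop i).zip (epitopes.drop i)).map (fun se =>
        if se.2.isEmpty then [] else bMatch (bPositions se.1.toList 0) se.2 0 1 []) := by
  intro n
  induction n with
  | zero =>
    intro i acc hn
    have hi : seqs.length ≤ i := by omega
    rw [aOuter]
    simp [Nat.not_lt.mpr hi, List.drop_eq_nil_of_le hi]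
  | succ m ih =>
    intro i acc hn
    have hi : i < seqs.length := by omega
    have hie : i < epitopes.length := by omega
    rw [aOuter, dif_pos hi]
    rw [ih (i + 1) _ (by omega)]
    have hds : seqs.drop i = seqs[i] :: seqs.drop (i + 1) := (List.getElem_cons_drop hi).symm
    have hde : epitopes.drop i = epitopes[i] :: epitopes.drop (i + 1) :=
      (List.getElem_cons_drop hie).symm
    rw [hds, hde, List.zip_cons_cons, List.map_cons]
    have hget : (PySem.List.pyGet? epitopes (i : Int)).getD [] = epitopes[i] := by
      rw [PySem.List.pyGet?_natCast]
      simp [List.getElem?_eq_getElem hie]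
    rw [hget, per_seq]
    simp

-- ===== VERDICT (by name: the statement is the Claim_ definition above) =====
theorem remap_epitopes_spec : Claim_equal_remap_epitopes := by
  intro epitopes seqs _ hpre
  unfold Spec_remap_epitopes remap_epitopes remap_epitopes_alt
  rw [outer_eq epitopes seqs hpre (seqs.length) 0 [] (by omega)]
  simp
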